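-- pv_equiv track=rewrite | github.com/weihe13/Lee_code | Amazon/amazon.py | deleteK
-- ===== SOURCE A (Python) =====
-- def deleteK(arr, k):
--     min_ = float("inf")
--     left = 0
--     right = k
--     sum_ = sum(arr) - sum(arr[left:right])
--     min_ = sum_
--     while right < len(arr):
--         sum_ += arr[left] - arr[right]
--         min_ = min(min_, sum_)
--         left += 1
--         right += 1
--     return min_
-- ===== SOURCE B (Python) =====
-- def deleteK(arr, k):
--     total = sum(arr)
--     n = len(arr)
--     if k >= n:
--         return 0
--     # prefix sums: P[i] = sum(arr[:i])
--     P = [0]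
--     s = 0
--     for x in arr:
--         s += x
--         P.append(s)
--     best = max(P[i + k] - P[i] for i in range(n - k + 1))
--     return total - best
-- ===== Notes on version B (the rewrite author's own statement) =====
-- stated objective: alternative
-- what changed: B replaces A's sliding-window update loop with a prefix-sum array: it builds P[i]=sum(arr[:i]) once, takes total minus the maximum P[i+k]-P[i], and returns 0 directly when k>=len(arr); only the return value is computed, no incremental window maintenance.
import Mathlib
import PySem

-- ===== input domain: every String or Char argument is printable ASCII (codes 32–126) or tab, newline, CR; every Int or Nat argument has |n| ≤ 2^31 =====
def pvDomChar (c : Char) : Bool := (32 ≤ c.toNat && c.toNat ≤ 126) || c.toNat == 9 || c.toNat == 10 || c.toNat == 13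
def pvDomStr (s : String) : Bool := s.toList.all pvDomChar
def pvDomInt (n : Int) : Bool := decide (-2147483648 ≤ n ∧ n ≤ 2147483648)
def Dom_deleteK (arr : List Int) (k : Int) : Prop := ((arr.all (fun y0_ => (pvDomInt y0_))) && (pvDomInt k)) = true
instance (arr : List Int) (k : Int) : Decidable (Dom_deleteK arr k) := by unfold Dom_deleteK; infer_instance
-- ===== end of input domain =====

-- B replaces the sliding-window minimum with prefix sums (total minus maximal k-window); same O(n) cost, different structure.

-- ===== PORT A =====
-- A's while loop; fuel = number of remaining iterations (len(arr) - right), exact for k ≥ 0 (Pre_).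
def deleteKLoop (arr : List Int) (fuel : Nat) (sum_ min_ : Int) (left right : Int) : Int :=
  match fuel with
  | 0 => min_
  | f+1 =>
    if right < (arr.length : Int) then
      let s := sum_ + (PySem.List.pyGet? arr left).getD 0 - (PySem.List.pyGet? arr right).getD 0
      deleteKLoop arr f s (min min_ s) (left + 1) (right + 1)
    else min_

def deleteK (arr : List Int) (k : Int) : Int :=
  let sum_ := arr.sum - (PySem.List.slice arr (some 0) (some k)).sum
  deleteKLoop arr ((arr.length : Int) - k).toNat sum_ sum_ 0 k

-- ===== PORT B =====
def deleteK_alt (arr : List Int) (k : Int) : Int :=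
  let total := arr.sum
  let n : Int := (arr.length : Int)
  if n ≤ k then 0
  else
    let sp := arr.foldl (fun (sp : Int × List Int) x => (sp.1 + x, sp.2 ++ [sp.1 + x])) (0, [0])
    let P := sp.2
    let best := (PySem.List.max?
        ((PySem.List.pyRange 0 (n - k + 1)).map
          (fun i => (PySem.List.pyGet? P (i + k)).getD 0 - (PySem.List.pyGet? P i).getD 0)) id).getD 0
    total - best

-- ===== PRECONDITION & SPEC =====
-- A raises IndexError for every k < 0 (its indices run past the list), so Pre_ is exactly 0 ≤ k.
def Pre_deleteK (arr : List Int) (k : Int) : Prop := 0 ≤ k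
instance (arr : List Int) (k : Int) : Decidable (Pre_deleteK arr k) := by unfold Pre_deleteK; infer_instance
def pvWitness_deleteK : List Int × Int := ([1, 2, 3], 1)

def Spec_deleteK (arr : List Int) (k : Int) (out : Int) : Prop := out = deleteK_alt arr k
instance (arr : List Int) (k : Int) (out : Int) : Decidable (Spec_deleteK arr k out) := by unfold Spec_deleteK; infer_instance

-- ===== CLAIM (what is proved, stated in full; the proofs are below) =====
def Claim_equal_deleteK : Prop := ∀ (arr : List Int) (k : Int), Dom_deleteK arr k → Pre_deleteK arr k → Spec_deleteK arr k (deleteK arr k)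

-- ===== LEMMAS AND PROOFS =====

-- prefix sum of the first i elements, and the k-window sum starting at i
def pvS (arr : List Int) (i : Nat) : Int := (arr.take i).sum
def pvW (arr : List Int) (K i : Nat) : Int := pvS arr (i + K) - pvS arr i

theorem pvS_succ (arr : List Int) (i : Nat) (h : i < arr.length) :
    pvS arr (i + 1) = pvS arr i + arr[i] :=
  List.sum_take_succ arr i h

-- B's prefix fold builds the list of all prefix sums
theorem fold_prefix (xs : List Int) : ∀ (c : Int) (acc : List Int),
    xs.foldl (fun (sp : Int × List Int) x => (sp.1 + x, sp.2 ++ [sp.1 + x])) (c, acc) =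
      (c + xs.sum, acc ++ (List.range xs.length).map (fun i => c + (xs.take (i + 1)).sum)) := by
  induction xs with
  | nil => simp
  | cons x t ih =>
    intro c acc
    simp only [List.foldl_cons, ih, List.length_cons, List.range_succ_eq_map, List.map_cons,
      List.map_map, List.sum_cons, Prod.mk.injEq, List.append_assoc, List.singleton_append]
    refine ⟨by ring, ?_⟩
    congr 1
    congr 1
    · simp
    · congr 1
      funext i
      simp [Function.comp, List.take_succ_cons, List.sum_cons]
      ring

theorem P_eq (arr : List Int) :
    (arr.foldl (fun (sp : Int × List Int) x => (sp.1 + x, sp.2 ++ [sp.1 + x])) (0, [0])).2 =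
      (List.range (arr.length + 1)).map (pvS arr) := by
  rw [fold_prefix]
  simp only [List.range_succ_eq_map, List.map_cons, List.map_map]
  simp [pvS]

theorem getP (arr : List Int) (i : Nat) (h : i ≤ arr.length) :
    (PySem.List.pyGet? ((List.range (arr.length + 1)).map (pvS arr)) (i : Int)).getD 0 =
      pvS arr i := by
  rw [PySem.List.pyGet?_natCast]
  rw [List.getElem?_map]
  have : i < arr.length + 1 := by omega
  simp [this]

-- Python max over a nonempty int list is a fold of max
theorem max?_cons (a : Int) (l : List Int) :
    (PySem.List.max? (a :: l) id).getD 0 = l.foldl max a := by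
  have key : ∀ (t : List Int) (m : Int),
      List.foldl (fun acc x => match acc with
        | none => some x
        | some m => if id m < id x then some x else some m) (some m) t
        = some (t.foldl max m) := by
    intro t
    induction t with
    | nil => intro m; simp
    | cons x t ih =>
      intro m
      rcases lt_or_ge m x with h | h
      · simpa [List.foldl_cons, h, max_eq_right h.le] using ih x
      · simpa [List.foldl_cons, not_lt.mpr h, max_eq_left h] using ih m
  simp only [PySem.List.max?, List.foldl_cons]
  rw [List.foldl_ext _ (fun acc x => match acc with
        | none => some x
        | some m => if id m < id x then some x else some m)
      _ (fun o x _ => by cases o <;> rfl)]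
  rw [key l a]
  rfl

-- A's loop computes the running minimum of (total − window j) over the remaining windows
theorem loopA (arr : List Int) (K : Nat) : ∀ (f l : Nat) (m : Int), l + K + f = arr.length →
    deleteKLoop arr f (arr.sum - pvW arr K l) m (l : Int) ((l : Int) + (K : Int)) =
      ((List.range f).map (fun j => l + 1 + j)).foldl
        (fun acc j => min acc (arr.sum - pvW arr K j)) m := by
  intro f
  induction f with
  | zero => intro l m _; simp [deleteKLoop]
  | succ f ih =>
    intro l m h
    have hlK : l + K < arr.length := by omega
    have hl : l < arr.length := by omega
    have hguard : (l : Int) + (K : Int) < (arr.length : Int) := by exact_mod_cast hlK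
    simp only [deleteKLoop, if_pos hguard]
    have hgl : (PySem.List.pyGet? arr (l : Int)).getD 0 = arr[l] := by
      rw [PySem.List.pyGet?_natCast]; simp [List.getElem?_eq_getElem hl]
    have hglK : (PySem.List.pyGet? arr ((l : Int) + (K : Int))).getD 0 = arr[l + K] := by
      have : (l : Int) + (K : Int) = ((l + K : Nat) : Int) := by push_cast; ring
      rw [this, PySem.List.pyGet?_natCast]; simp [List.getElem?_eq_getElem hlK]
    have hstep : arr.sum - pvW arr K l + (PySem.List.pyGet? arr (l : Int)).getD 0 -
        (PySem.List.pyGet? arr ((l : Int) + (K : Int))).getD 0 = arr.sum - pvW arr K (l + 1) := by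
      rw [hgl, hglK]
      have h1 : pvS arr (l + 1) = pvS arr l + arr[l] := pvS_succ arr l hl
      have h2 : pvS arr (l + K + 1) = pvS arr (l + K) + arr[l + K] := pvS_succ arr (l + K) hlK
      simp only [pvW]
      have h3 : l + 1 + K = l + K + 1 := by omega
      rw [h3, h2, h1]; ring
    rw [hstep]
    have hc1 : (l : Int) + 1 = ((l + 1 : Nat) : Int) := by push_cast; ring
    have hc2 : (l : Int) + (K : Int) + 1 = ((l + 1 : Nat) : Int) + (K : Int) := by push_cast; ring
    rw [hc1, hc2, ih (l + 1) (min m (arr.sum - pvW arr K (l + 1))) (by omega)]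
    simp only [List.range_succ_eq_map, List.map_cons, List.map_map, List.foldl_cons]
    congr 1
    apply List.map_congr_left
    intro j _
    simp [Function.comp]
    omega

-- duality: a running minimum of (T − g j) is T minus the running maximum of g j
theorem min_fold_dual (g : Nat → Int) (T : Int) : ∀ (js : List Nat) (a : Int),
    js.foldl (fun acc j => min acc (T - g j)) (T - a) = T - js.foldl (fun acc j => max acc (g j)) a := by
  intro js
  induction js with
  | nil => intro a; simp
  | cons j t ih =>
    intro a
    simp only [List.foldl_cons]
    have : min (T - a) (T - g j) = T - max a (g j) := by omega
    rw [this, ih]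

theorem slice_front (arr : List Int) (K : Nat) :
    (PySem.List.slice arr (some 0) (some (K : Int))).sum = pvS arr K := by
  have h0 : (0 : Int) = ((0 : Nat) : Int) := rfl
  rw [h0, PySem.List.slice_natCast]
  simp [pvS]

-- ===== VERDICT (by name: the statement is the Claim_ definition above) =====
theorem deleteK_spec : Claim_equal_deleteK := by
  intro arr k _ hk
  obtain ⟨K, rfl⟩ : ∃ K : Nat, k = (K : Int) := ⟨k.toNat, (Int.toNat_of_nonneg hk).symm⟩
  unfold Spec_deleteK deleteK deleteK_alt
  simp only [slice_front]
  by_cases hbig : arr.length ≤ K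
  · -- k ≥ len(arr): A's loop never runs and its initial value is 0; B returns 0
    have hbig' : (arr.length : Int) ≤ (K : Int) := by exact_mod_cast hbig
    have hfuel : ((arr.length : Int) - (K : Int)).toNat = 0 := by omega
    have htake : pvS arr K = arr.sum := by
      simp [pvS, List.take_of_length_le hbig]
    rw [if_pos hbig', hfuel]
    simp [deleteKLoop, htake]
  · have hbig' : ¬((arr.length : Int) ≤ (K : Int)) := by
      intro hc; exact hbig (by exact_mod_cast hc)
    rw [if_neg hbig']
    have hfuel : ((arr.length : Int) - (K : Int)).toNat = arr.length - K := by omega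
    rw [hfuel]
    -- A side
    have h0 : pvS arr K = pvW arr K 0 := by simp [pvW, pvS]
    have hA := loopA arr K (arr.length - K) 0 (arr.sum - pvW arr K 0) (by omega)
    simp only [Nat.cast_zero, zero_add] at hA
    rw [h0, hA]
    -- B side: the best-window list is the map of pvW over range (len − K + 1)
    rw [P_eq]
    have hrange : (arr.length : Int) - (K : Int) + 1 = ((arr.length - K + 1 : Nat) : Int) := by omega
    rw [hrange, PySem.List.pyRange_zero_natCast, List.map_map]
    have hmapped : (List.range (arr.length - K + 1)).map
        ((fun i => (PySem.List.pyGet? ((List.range (arr.length + 1)).map (pvS arr)) (i + (K : Int))).getD 0 -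
          (PySem.List.pyGet? ((List.range (arr.length + 1)).map (pvS arr)) i).getD 0) ∘ (fun j : Nat => (j : Int))) =
        (List.range (arr.length - K + 1)).map (pvW arr K) := by
      apply List.map_congr_left
      intro j hj
      have hj' : j < arr.length - K + 1 := List.mem_range.mp hj
      have hc : ((j : Int) + (K : Int)) = ((j + K : Nat) : Int) := by push_cast; ring
      simp only [Function.comp_apply, hc]
      rw [getP arr (j + K) (by omega), getP arr j (by omega)]
      rfl
    rw [hmapped, List.range_succ_eq_map, List.map_cons, List.map_map, max?_cons]
    rw [List.foldl_map,
      min_fold_dual (fun j => pvW arr K (1 + j)) arr.sum (List.range (arr.length - K)) (pvW arr K 0),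
      List.foldl_map]
    have hfun : (fun (acc : Int) (j : Nat) => max acc (pvW arr K (1 + j))) =
        (fun (acc : Int) (j : Nat) => max acc ((pvW arr K ∘ Nat.succ) j)) := by
      funext acc j
      simp only [Function.comp_apply]
      have h1 : 1 + j = Nat.succ j := by omega
      rw [h1]
    rw [hfun]
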